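-- pv_equiv track=rewrite | github.com/Adrian20040101/Python | Exercitii_Suplimentare_FP/recursion_ex.py | gerade
-- ===== SOURCE A (Python) =====
-- def gerade(number):
--     if number == 0:
--         return 0
--     else:
--         last_digit = number % 10
--         if last_digit % 2 == 0:
--             return last_digit + gerade(number // 10)
--         else:
--             return gerade(number // 10)
-- ===== SOURCE B (Python) =====
-- def gerade(number):
--     digits = []
--     while number != 0:
--         digits.append(number % 10)
--         number //= 10
--     return sum(d for d in digits if d % 2 == 0)
-- ===== Notes on version B (the rewrite author's own statement) =====
-- stated objective: alternative
-- what changed: Replaced the recursion that interleaves digit extraction with accumulation by two staged passes: first build the list of digits iteratively, then sum the even ones with a filtered sum.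
import Mathlib
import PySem

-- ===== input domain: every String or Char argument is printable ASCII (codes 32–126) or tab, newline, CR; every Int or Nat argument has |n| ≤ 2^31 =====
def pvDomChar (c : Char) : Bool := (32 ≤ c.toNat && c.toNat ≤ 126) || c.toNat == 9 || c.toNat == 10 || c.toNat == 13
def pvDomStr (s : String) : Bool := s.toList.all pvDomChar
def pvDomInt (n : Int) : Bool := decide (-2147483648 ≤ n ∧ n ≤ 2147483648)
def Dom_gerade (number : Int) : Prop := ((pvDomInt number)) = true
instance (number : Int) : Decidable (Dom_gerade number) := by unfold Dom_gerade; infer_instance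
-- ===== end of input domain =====

-- B replaces A's recursion (which interleaves extraction and summation) by two staged passes:
-- build the digit list, then sum its even members; return values agree on all non-negative inputs
-- (A raises RecursionError and B loops forever on negative inputs).

-- ===== PORT A =====
-- A's recursion, made total with a fuel counter (number.toNat + 1 steps suffice for the
-- non-negative inputs admitted by Pre_; the fuel is a totality guard, not a different algorithm).
def geradeFuel : Nat → Int → Int
  | 0, _ => 0
  | f + 1, n =>
    if n = 0 then 0
    else
      let last_digit := PySem.Int.mod n 10
      if PySem.Int.mod last_digit 2 = 0 then last_digit + geradeFuel f (PySem.Int.floordiv n 10)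
      else geradeFuel f (PySem.Int.floordiv n 10)

def gerade (number : Int) : Int := geradeFuel (number.toNat + 1) number

-- ===== PORT B =====
-- Pass 1 of Source B: the while loop appending number % 10 and dividing, as a fuel recursion
-- producing the digit list (same fuel guard for totality).
def geradeDigits : Nat → Int → List Int
  | 0, _ => []
  | f + 1, n =>
    if n = 0 then []
    else PySem.Int.mod n 10 :: geradeDigits f (PySem.Int.floordiv n 10)

-- Pass 2 of Source B: sum(d for d in digits if d % 2 == 0).
def gerade_alt (number : Int) : Int :=
  (((geradeDigits (number.toNat + 1) number).filter (fun d => PySem.Int.mod d 2 == 0))).sum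

-- ===== PRECONDITION & SPEC =====
-- Pre_ excludes negative numbers: there A recurses forever (RecursionError) and B's while loop never terminates.
def Pre_gerade (number : Int) : Prop := 0 ≤ number
instance (number : Int) : Decidable (Pre_gerade number) := by unfold Pre_gerade; infer_instance
def pvWitness_gerade : Int := 2468

def Spec_gerade (number : Int) (out : Int) : Prop := out = gerade_alt number
instance (number : Int) (out : Int) : Decidable (Spec_gerade number out) := by unfold Spec_gerade; infer_instance

-- ===== CLAIM =====
def Claim_equal_gerade : Prop := ∀ (number : Int), Dom_gerade number → Pre_gerade number → Spec_gerade number (gerade number)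

-- ===== LEMMAS AND PROOFS =====
-- Filtering the staged digit list for even digits and summing equals A's fused recursion,
-- for ANY fuel (both run on the same fuel, so no sufficiency argument is needed).
theorem filter_sum_digits (f : Nat) :
    ∀ (n : Int), ((geradeDigits f n).filter (fun d => PySem.Int.mod d 2 == 0)).sum = geradeFuel f n := by
  induction f with
  | zero => intro n; simp [geradeDigits, geradeFuel]
  | succ f ih =>
    intro n
    simp only [geradeDigits, geradeFuel]
    split_ifs with h0 he <;> simp_all

-- ===== VERDICT =====
theorem gerade_spec : Claim_equal_gerade := by
  intro number _ _
  unfold Spec_gerade gerade gerade_alt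
  rw [filter_sum_digits]
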